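-- pv_equiv track=rewrite | github.com/MSRA-COLT/gsgd | gsgd_cnn/models/model_utils.py | plainnet_ec_layer
-- ===== SOURCE A (Python) =====
-- def plainnet_ec_layer(num_blocks):
--     t = 1
--
--     conv_idx = [ ]
--
--     for i,n in enumerate(num_blocks):
--         k=0
--         tmp = []
--         while k<n:
--             tmp.append(t*3)
--             t+=1
--             k+=1
--         conv_idx.append(tmp)
--
--     return conv_idx
-- ===== SOURCE B (Python) =====
-- def plainnet_ec_layer(num_blocks):
--     # generate-everything-then-partition: build the full flat sequence of
--     # multiples of 3 once, then cut it into blocks with a running offset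
--     total = sum(max(n, 0) for n in num_blocks)
--     flat = [3 * i for i in range(1, total + 1)]
--     out = []
--     off = 0
--     for n in num_blocks:
--         m = max(n, 0)
--         out.append(flat[off:off + m])
--         off += m
--     return out
-- ===== Notes on version B (the rewrite author's own statement) =====
-- stated objective: alternative
-- what changed: B replaces A's interleaved nested loops with cross-block counter t by a generate-then-partition strategy: it computes the total count, builds the whole flat list of multiples of 3 in one pass, then slices it into blocks with a running offset.
import Mathlib
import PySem

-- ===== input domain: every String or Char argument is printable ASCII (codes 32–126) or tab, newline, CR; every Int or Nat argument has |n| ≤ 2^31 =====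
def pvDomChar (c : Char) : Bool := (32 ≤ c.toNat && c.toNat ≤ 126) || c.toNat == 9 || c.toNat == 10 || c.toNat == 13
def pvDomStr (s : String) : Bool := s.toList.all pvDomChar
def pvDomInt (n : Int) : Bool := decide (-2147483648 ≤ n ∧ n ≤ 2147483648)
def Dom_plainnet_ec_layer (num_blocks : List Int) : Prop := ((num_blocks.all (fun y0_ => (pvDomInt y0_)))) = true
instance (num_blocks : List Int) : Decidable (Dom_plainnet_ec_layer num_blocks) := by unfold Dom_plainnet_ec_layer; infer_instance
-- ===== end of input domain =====

-- B builds the whole flat list of multiples of 3 once and slices it into blocks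
-- with a running offset, instead of A's nested loops with a cross-block counter.

-- ===== PORT A =====
-- the inner 'while k < n' loop of A: appends t*3, increments t and k
def pvAInner (k n t : Int) (tmp : List Int) : Int × List Int :=
  if _h : k < n then pvAInner (k + 1) n (t + 1) (tmp ++ [t * 3]) else (t, tmp)
termination_by (n - k).toNat
decreasing_by omega

def plainnet_ec_layer (num_blocks : List Int) : List (List Int) :=
  (num_blocks.foldl
    (fun (st : Int × List (List Int)) n =>
      let r := pvAInner 0 n st.1 []
      (r.1, st.2 ++ [r.2]))
    (1, [])).2

-- ===== PORT B =====
def plainnet_ec_layer_alt (num_blocks : List Int) : List (List Int) :=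
  let total := num_blocks.foldl (fun s n => s + max n 0) 0
  let flat := (PySem.List.pyRange 1 (total + 1) 1).map (fun i => 3 * i)
  (num_blocks.foldl
    (fun (st : Int × List (List Int)) n =>
      let m := max n 0
      (st.1 + m, st.2 ++ [PySem.List.slice flat (some st.1) (some (st.1 + m))]))
    (0, [])).2

-- ===== PRECONDITION & SPEC =====
def Spec_plainnet_ec_layer (num_blocks : List Int) (out : List (List Int)) : Prop := out = plainnet_ec_layer_alt num_blocks
instance (num_blocks : List Int) (out : List (List Int)) : Decidable (Spec_plainnet_ec_layer num_blocks out) := by unfold Spec_plainnet_ec_layer; infer_instance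

-- ===== CLAIM (what is proved, stated in full; the proofs are below) =====
def Claim_equal_plainnet_ec_layer : Prop := ∀ (num_blocks : List Int), Dom_plainnet_ec_layer num_blocks → Spec_plainnet_ec_layer num_blocks (plainnet_ec_layer num_blocks)

-- ===== LEMMAS AND PROOFS =====

-- sum of the nonnegative parts of the list
def pvSumPos : List Int → Int
  | [] => 0
  | n :: l => max n 0 + pvSumPos l

-- the common specification of the produced blocks: block at counter t of size m
def pvBlock (t : Int) (m : Nat) : List Int :=
  (List.range m).map (fun j : Nat => (t + (j : Int)) * 3)

def pvBlocks (t : Int) : List Int → List (List Int)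
  | [] => []
  | n :: l => pvBlock t (max n 0).toNat :: pvBlocks (t + max n 0) l

lemma pvSumPos_nonneg (l : List Int) : 0 ≤ pvSumPos l := by
  induction l with
  | nil => simp [pvSumPos]
  | cons n l ih => simp [pvSumPos]; omega

lemma pvAInner_spec (m : Nat) : ∀ (k n t : Int) (tmp : List Int), (n - k).toNat = m →
    pvAInner k n t tmp = (t + m, tmp ++ pvBlock t m) := by
  induction m with
  | zero =>
    intro k n t tmp h
    rw [pvAInner, dif_neg (by omega)]
    simp [pvBlock]
  | succ m ih =>
    intro k n t tmp h
    rw [pvAInner, dif_pos (by omega)]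
    rw [ih (k + 1) n (t + 1) (tmp ++ [t * 3]) (by omega)]
    simp only [Prod.mk.injEq]
    refine ⟨by push_cast; ring, ?_⟩
    simp [pvBlock, List.range_succ_eq_map, List.map_map, List.append_assoc]
    intro j _
    ring

lemma pvA_fold (l : List Int) : ∀ (t : Int) (acc : List (List Int)),
    l.foldl (fun (st : Int × List (List Int)) n =>
      let r := pvAInner 0 n st.1 []
      (r.1, st.2 ++ [r.2])) (t, acc)
    = (t + pvSumPos l, acc ++ pvBlocks t l) := by
  induction l with
  | nil => intro t acc; simp [pvSumPos, pvBlocks]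
  | cons n l ih =>
    intro t acc
    simp only [List.foldl_cons]
    rw [pvAInner_spec (n - 0).toNat 0 n t [] rfl]
    have hmax : ((n - 0).toNat : Int) = max n 0 := by omega
    rw [show ((n - 0).toNat : Int) = max n 0 from hmax] 
    have hm : (n - 0).toNat = (max n 0).toNat := by omega
    rw [hm, ih]
    simp [pvSumPos, pvBlocks]
    ring

-- slicing the flat list [3*1, …, 3*N] gives exactly the block at counter off+1
lemma pvSlice_flat (N a m : Nat) (h : a + m ≤ N) :
    PySem.List.slice ((PySem.List.pyRange 1 ((N : Int) + 1) 1).map (fun i => 3 * i))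
      (some (a : Int)) (some ((a : Int) + (m : Int)))
    = pvBlock ((a : Int) + 1) m := by
  rw [PySem.List.slice_natCast_add, PySem.List.pyRange_one]
  have hN : (((N : Int) + 1 - 1)).toNat = N := by omega
  rw [hN, List.map_map]
  apply List.ext_getElem
  · simp [pvBlock]; omega
  · intro i h1 h2
    simp only [pvBlock, List.getElem_take, List.getElem_drop, List.getElem_map,
      List.getElem_range, Function.comp]
    push_cast
    ring

lemma pvSumPos_foldl (l : List Int) : ∀ (s : Int),
    l.foldl (fun s n => s + max n 0) s = s + pvSumPos l := by
  induction l with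
  | nil => intro s; simp [pvSumPos]
  | cons n l ih => intro s; simp only [List.foldl_cons, pvSumPos]; rw [ih]; ring

lemma pvB_fold (N : Nat) (l : List Int) : ∀ (off : Int) (acc : List (List Int)),
    0 ≤ off → off + pvSumPos l ≤ (N : Int) →
    l.foldl (fun (st : Int × List (List Int)) n =>
      let m := max n 0
      (st.1 + m, st.2 ++ [PySem.List.slice
        ((PySem.List.pyRange 1 ((N : Int) + 1) 1).map (fun i => 3 * i))
        (some st.1) (some (st.1 + m))])) (off, acc)
    = (off + pvSumPos l, acc ++ pvBlocks (off + 1) l) := by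
  induction l with
  | nil => intro off acc _ _; simp [pvSumPos, pvBlocks]
  | cons n l ih =>
    intro off acc hoff hle
    simp only [List.foldl_cons, pvSumPos] at *
    have hm0 : 0 ≤ max n 0 := le_max_right n 0
    have hsp := pvSumPos_nonneg l
    have hoff' : off = ((off.toNat : Nat) : Int) := by omega
    have hmax : max n 0 = (((max n 0).toNat : Nat) : Int) := by omega
    rw [show PySem.List.slice
        ((PySem.List.pyRange 1 ((N : Int) + 1) 1).map (fun i => 3 * i))
        (some off) (some (off + max n 0))
      = pvBlock (off + 1) (max n 0).toNat from by
        rw [hoff', hmax]; exact pvSlice_flat N off.toNat (max n 0).toNat (by omega)]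
    rw [ih (off + max n 0) _ (by omega) (by omega)]
    simp only [pvBlocks, Prod.mk.injEq]
    refine ⟨by ring, ?_⟩
    rw [show off + max n 0 + 1 = off + 1 + max n 0 from by ring]
    simp [List.append_assoc]

-- ===== VERDICT (by name: the statement is the Claim_ definition above) =====
theorem plainnet_ec_layer_spec : Claim_equal_plainnet_ec_layer := by
  intro num_blocks _
  unfold Spec_plainnet_ec_layer plainnet_ec_layer plainnet_ec_layer_alt
  simp only
  rw [pvSumPos_foldl]
  have hN : (0 : Int) + pvSumPos num_blocks = ((pvSumPos num_blocks).toNat : Int) := by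
    have := pvSumPos_nonneg num_blocks; omega
  rw [hN, pvB_fold (pvSumPos num_blocks).toNat num_blocks 0 []
    (le_refl 0) (by have := pvSumPos_nonneg num_blocks; omega)]
  rw [pvA_fold]
  simp
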